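-- pv_equiv track=rewrite | github.com/CAPOJ/BotIP | transform_mask.py | convert_cidr_to_subnet_mask
-- ===== SOURCE A (Python) =====
-- def convert_cidr_to_subnet_mask(cidr):
--     """
--     Преобразует маску подсети в формате /nn в формат 255.255.255.0.
--     """
--     prefix_length = int(cidr.replace('/', ''))
--     subnet_mask = []
--     for i in range(4):
--         if i < prefix_length // 8:
--             subnet_mask.append('255')
--         elif i == prefix_length // 8:
--             subnet_mask.append(str(256 - 2 ** (8 - (prefix_length % 8))))
--         else:
--             subnet_mask.append('0')
--     return '.'.join(subnet_mask)
-- ===== SOURCE B (Python) =====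
-- def convert_cidr_to_subnet_mask(cidr):
--     prefix_length = int(cidr.replace('/', ''))
--     bits = ('1' * prefix_length + '0' * (32 - prefix_length))[:32]
--     return '.'.join(str(int(bits[8 * i:8 * (i + 1)], 2)) for i in range(4))
-- ===== Notes on version B (the rewrite author's own statement) =====
-- stated objective: alternative
-- what changed: B builds the full 32-bit pattern '1'*prefix+'0'*(32-prefix), truncates to 32 bits and converts each 8-char slice with int(chunk,2), replacing A's per-octet branching on prefix//8 and prefix%8.
import Mathlib
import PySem

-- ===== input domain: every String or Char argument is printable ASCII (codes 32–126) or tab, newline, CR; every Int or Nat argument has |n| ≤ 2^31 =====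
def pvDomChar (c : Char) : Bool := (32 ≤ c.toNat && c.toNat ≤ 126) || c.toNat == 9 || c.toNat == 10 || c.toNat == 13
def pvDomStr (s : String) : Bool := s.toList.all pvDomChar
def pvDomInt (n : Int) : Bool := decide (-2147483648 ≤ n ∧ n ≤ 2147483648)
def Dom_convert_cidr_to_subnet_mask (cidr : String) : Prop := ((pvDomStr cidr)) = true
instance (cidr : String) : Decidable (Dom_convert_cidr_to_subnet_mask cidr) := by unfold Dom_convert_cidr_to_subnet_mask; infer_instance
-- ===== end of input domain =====

-- B computes the mask from the 32-bit pattern '1'*prefix + '0'*(32-prefix) sliced into four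
-- binary octets, instead of A's per-octet branching on prefix//8 — an alternative algorithm.
-- Pre_ excludes strings whose '/'-stripped form is not a Python int literal (A raises ValueError).


-- ===== PORT A =====
-- the loop body after parsing; p % 8 ∈ [0,8) so the exponent 8 - p%8 is in (0,8] and .toNat is exact
def pvMaskA (p : Int) : String :=
  let subnet_mask : List String := (PySem.List.pyRange 0 4 1).foldl (fun acc i =>
    if i < PySem.Int.floordiv p 8 then acc ++ ["255"]
    else if i = PySem.Int.floordiv p 8 then
      acc ++ [PySem.Int.toStr (256 - 2 ^ ((8 - PySem.Int.mod p 8).toNat))]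
    else acc ++ ["0"]) []
  PySem.Str.join "." subnet_mask

def convert_cidr_to_subnet_mask (cidr : String) : String :=
  match PySem.Int.ofStr? (PySem.Str.replace cidr "/" "") with
  | none => ""          -- Python raises ValueError here; excluded by Pre_
  | some p => pvMaskA p

-- ===== PORT B =====
-- int(chunk, 2) for a string of '0'/'1' characters (all this program ever passes)
def pvParseBin (cs : List Char) : Int :=
  cs.foldl (fun acc c => acc * 2 + (if c = '1' then 1 else 0)) 0

def pvMaskB (p : Int) : String :=
  let bits : List Char := (List.replicate p.toNat '1' ++ List.replicate (32 - p).toNat '0').take 32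
  PySem.Str.join "." ((PySem.List.pyRange 0 4 1).map (fun i =>
    PySem.Int.toStr (pvParseBin (PySem.List.slice bits (some (8 * i)) (some (8 * (i + 1)))))))

def convert_cidr_to_subnet_mask_alt (cidr : String) : String :=
  match PySem.Int.ofStr? (PySem.Str.replace cidr "/" "") with
  | none => ""          -- Python raises ValueError here; excluded by Pre_
  | some p => pvMaskB p

-- ===== PRECONDITION & SPEC =====
-- Pre_ excludes exactly the inputs where int(cidr.replace('/','')) raises ValueError.
def Pre_convert_cidr_to_subnet_mask (cidr : String) : Prop :=
  (PySem.Int.ofStr? (PySem.Str.replace cidr "/" "")).isSome = true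
instance (cidr : String) : Decidable (Pre_convert_cidr_to_subnet_mask cidr) := by
  unfold Pre_convert_cidr_to_subnet_mask; infer_instance
def pvWitness_convert_cidr_to_subnet_mask : String := "/24"

def Spec_convert_cidr_to_subnet_mask (cidr : String) (out : String) : Prop := out = convert_cidr_to_subnet_mask_alt cidr
instance (cidr : String) (out : String) : Decidable (Spec_convert_cidr_to_subnet_mask cidr out) := by unfold Spec_convert_cidr_to_subnet_mask; infer_instance

-- ===== CLAIM (what is proved, stated in full; the proofs are below) =====
def Claim_equal_convert_cidr_to_subnet_mask : Prop := ∀ (cidr : String), Dom_convert_cidr_to_subnet_mask cidr → Pre_convert_cidr_to_subnet_mask cidr → Spec_convert_cidr_to_subnet_mask cidr (convert_cidr_to_subnet_mask cidr)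

-- ===== LEMMAS AND PROOFS =====

lemma pvMaskA_neg (p : Int) (h : p < 0) : pvMaskA p = "0.0.0.0" := by
  have hq : PySem.Int.floordiv p 8 < 0 := by
    rw [PySem.Int.floordiv_eq_ediv_of_pos (by omega)]; omega
  have hr : PySem.List.pyRange 0 4 1 = [0, 1, 2, 3] := by decide
  simp only [pvMaskA, hr, List.foldl]
  rw [if_neg (by omega), if_neg (by omega), if_neg (by omega), if_neg (by omega),
      if_neg (by omega), if_neg (by omega), if_neg (by omega), if_neg (by omega)]
  decide

lemma pvMaskA_big (p : Int) (h : 32 ≤ p) : pvMaskA p = "255.255.255.255" := by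
  have hq : 4 ≤ PySem.Int.floordiv p 8 := by
    rw [PySem.Int.floordiv_eq_ediv_of_pos (by omega)]; omega
  have hr : PySem.List.pyRange 0 4 1 = [0, 1, 2, 3] := by decide
  simp only [pvMaskA, hr, List.foldl]
  rw [if_pos (by omega), if_pos (by omega), if_pos (by omega), if_pos (by omega)]
  decide

lemma pvMaskB_neg (p : Int) (h : p < 0) : pvMaskB p = "0.0.0.0" := by
  have h1 : p.toNat = 0 := Int.toNat_of_nonpos (le_of_lt h)
  have hb : (List.replicate p.toNat '1' ++ List.replicate (32 - p).toNat '0').take 32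
      = List.replicate 32 '0' := by
    rw [h1]
    simp only [List.replicate_zero, List.nil_append, List.take_replicate]
    rw [min_eq_left (by omega)]
  simp only [pvMaskB, hb]
  decide

lemma pvMaskB_big (p : Int) (h : 32 ≤ p) : pvMaskB p = "255.255.255.255" := by
  have hb : (List.replicate p.toNat '1' ++ List.replicate (32 - p).toNat '0').take 32
      = List.replicate 32 '1' := by
    rw [List.take_append_of_le_length (by simp; omega), List.take_replicate,
        min_eq_left (by omega)]
  simp only [pvMaskB, hb]
  decide

lemma pvMask_eq (p : Int) : pvMaskA p = pvMaskB p := by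
  rcases lt_or_ge p 0 with h | h
  · rw [pvMaskA_neg p h, pvMaskB_neg p h]
  · rcases lt_or_ge p 32 with h2 | h2
    · interval_cases p <;> decide
    · rw [pvMaskA_big p h2, pvMaskB_big p h2]

-- ===== VERDICT (by name: the statement is the Claim_ definition above) =====
theorem convert_cidr_to_subnet_mask_spec : Claim_equal_convert_cidr_to_subnet_mask := by
  intro cidr _ hpre
  unfold Pre_convert_cidr_to_subnet_mask at hpre
  unfold Spec_convert_cidr_to_subnet_mask convert_cidr_to_subnet_mask convert_cidr_to_subnet_mask_alt
  cases h : PySem.Int.ofStr? (PySem.Str.replace cidr "/" "") with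
  | none => simp [h] at hpre
  | some p => exact pvMask_eq p
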